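-- pv_equiv track=rewrite | github.com/TeoNikolov/genea_visualizer | celery-queue/blender_render_2023.py | smooth_kernel
-- ===== SOURCE A (Python) =====
-- def smooth_kernel(data, offset=5):
--     out_data = []
--     for i in range(len(data)):
--         start = max(0, i - offset)
--         stop = min(len(data), i + offset + 1)
--         out_data.append(data[i])
--         for j in range(start, stop):
--             if data[j] > 0:
--                 out_data[-1] = 1
--                 break
--     return out_data
-- ===== SOURCE B (Python) =====
-- def smooth_kernel(data, offset=5):
--     n = len(data)
--     # prefix[k] = number of positive entries among data[0:k]
--     prefix = [0] * (n + 1)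
--     for i, v in enumerate(data):
--         prefix[i + 1] = prefix[i] + (1 if v > 0 else 0)
--     out = []
--     for i in range(n):
--         lo = max(0, i - offset)
--         hi = min(n, i + offset + 1)
--         if hi > lo and prefix[hi] - prefix[lo] > 0:
--             out.append(1)
--         else:
--             out.append(data[i])
--     return out
-- ===== Notes on version B (the rewrite author's own statement) =====
-- stated objective: faster
-- what changed: Replaces the inner scan of each length-(2*offset+1) window by a prefix-sum of positive entries, testing window positivity in O(1) per index.
import Mathlib
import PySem

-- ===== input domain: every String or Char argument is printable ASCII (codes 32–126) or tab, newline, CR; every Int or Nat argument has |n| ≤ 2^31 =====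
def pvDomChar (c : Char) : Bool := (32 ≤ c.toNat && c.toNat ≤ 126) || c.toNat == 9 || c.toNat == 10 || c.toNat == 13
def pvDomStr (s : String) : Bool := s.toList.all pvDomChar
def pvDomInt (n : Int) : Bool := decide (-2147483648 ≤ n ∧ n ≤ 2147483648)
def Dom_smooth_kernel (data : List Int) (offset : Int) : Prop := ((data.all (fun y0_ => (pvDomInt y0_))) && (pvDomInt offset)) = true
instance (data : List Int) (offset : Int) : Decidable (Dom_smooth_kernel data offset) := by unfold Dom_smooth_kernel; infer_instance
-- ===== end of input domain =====

-- B replaces A's O(offset) inner window scan by a prefix-sum of positive entries with an O(1) window test (objective: faster).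

-- ===== PORT A =====
-- inner 'for j in range(start, stop): if data[j] > 0: out_data[-1] = 1; break'
-- (the appended data[i] is threaded as 'cur'; the break returns 1 at once)
def smoothInnerA (data : List Int) : List Int → Int → Int
  | [], cur => cur
  | j :: rest, cur =>
      if PySem.List.pyGetD data j 0 > 0 then 1 else smoothInnerA data rest cur

def smooth_kernel (data : List Int) (offset : Int) : List Int :=
  (PySem.List.pyRange 0 (data.length : Int) 1).foldl (fun out i =>
    let start := max 0 (i - offset)
    let stop := min (data.length : Int) (i + offset + 1)
    out ++ [smoothInnerA data (PySem.List.pyRange start stop 1) (PySem.List.pyGetD data i 0)]) []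

-- ===== PORT B =====
-- Python B's first loop: prefix[k] = number of positive entries among data[0:k];
-- the fold carries (prefix list so far, its last value)
def buildPrefix (data : List Int) : List Int :=
  (data.foldl (fun (p : List Int × Int) v =>
    let s := p.2 + (if v > 0 then (1 : Int) else 0)
    (p.1 ++ [s], s)) ([0], 0)).1

def smooth_kernel_alt (data : List Int) (offset : Int) : List Int :=
  let n : Int := data.length
  let pref := buildPrefix data
  (PySem.List.pyRange 0 n 1).foldl (fun out i =>
    let lo := max 0 (i - offset)
    let hi := min n (i + offset + 1)
    out ++ [if lo < hi ∧ PySem.List.pyGetD pref hi 0 - PySem.List.pyGetD pref lo 0 > 0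
            then 1 else PySem.List.pyGetD data i 0]) []

-- ===== PRECONDITION & SPEC =====
def Spec_smooth_kernel (data : List Int) (offset : Int) (out : List Int) : Prop := out = smooth_kernel_alt data offset
instance (data : List Int) (offset : Int) (out : List Int) : Decidable (Spec_smooth_kernel data offset out) := by unfold Spec_smooth_kernel; infer_instance

-- ===== CLAIM (what is proved, stated in full; the proofs are below) =====
def Claim_equal_smooth_kernel : Prop := ∀ (data : List Int) (offset : Int), Dom_smooth_kernel data offset → Spec_smooth_kernel data offset (smooth_kernel data offset)

-- ===== LEMMAS AND PROOFS =====

-- appending one element per loop step is a map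
theorem pv_foldl_push {α β : Type} (f : α → β) :
    ∀ (l : List α) (init : List β),
      l.foldl (fun out i => out ++ [f i]) init = init ++ l.map f := by
  intro l
  induction l with
  | nil => intro init; simp
  | cons x xs ih => intro init; simp [List.foldl_cons, ih]

-- the positive-count of data[0:k], as an Int
def pvCt (data : List Int) (k : Nat) : Int :=
  ((data.take k).countP (fun x => decide (0 < x)) : Int)

theorem pv_buildPrefix_pair (data : List Int) :
    data.foldl (fun (p : List Int × Int) v =>
        let s := p.2 + (if v > 0 then (1 : Int) else 0)
        (p.1 ++ [s], s)) ([0], 0)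
      = ((List.range (data.length + 1)).map (fun k => pvCt data k),
         pvCt data data.length) := by
  induction data using List.reverseRecOn with
  | nil => simp [pvCt]
  | append_singleton xs v ih =>
      rw [List.foldl_append, ih]
      have hct : ∀ k : Nat, k ≤ xs.length → pvCt (xs ++ [v]) k = pvCt xs k := by
        intro k hk
        simp [pvCt, List.take_append_of_le_length hk]
      have hlast : pvCt (xs ++ [v]) (xs.length + 1)
          = pvCt xs xs.length + (if v > 0 then (1 : Int) else 0) := by
        have h1 : (xs ++ [v]).take (xs.length + 1) = xs ++ [v] :=
          List.take_of_length_le (by simp)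
        have h2 : xs.take xs.length = xs := List.take_length
        simp only [pvCt, h1, h2, List.countP_append]
        by_cases hv : v > 0 <;> simp [hv]
      simp only [List.foldl_cons, List.foldl_nil, Prod.mk.injEq]
      constructor
      · rw [List.length_append, List.length_singleton]
        conv_rhs => rw [List.range_succ]
        rw [List.map_append]
        congr 1
        · apply List.map_congr_left
          intro k hk
          exact (hct k (by simpa [Nat.lt_succ_iff] using List.mem_range.mp hk)).symm
        · simp [hlast]
      · rw [List.length_append, List.length_singleton, hlast]

theorem pv_buildPrefix_spec (data : List Int) :
    buildPrefix data = (List.range (data.length + 1)).map (fun k => pvCt data k) := by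
  unfold buildPrefix
  rw [pv_buildPrefix_pair]

theorem pv_prefix_get (data : List Int) (k : Int) (h0 : 0 ≤ k) (h1 : k ≤ (data.length : Int)) :
    PySem.List.pyGetD (buildPrefix data) k 0 = pvCt data k.toNat := by
  rw [pv_buildPrefix_spec]
  have hk : k.toNat < data.length + 1 := by omega
  rw [PySem.List.pyGetD_eq_getElem _ _ h0 (by simp; omega)]
  simp [List.getElem_map, List.getElem_range]

-- A's inner loop returns 1 iff some index of the range hits a positive entry
theorem pv_inner_eq (data : List Int) (js : List Int) (cur : Int) :
    smoothInnerA data js cur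
      = if js.any (fun j => decide (0 < PySem.List.pyGetD data j 0)) then 1 else cur := by
  induction js with
  | nil => simp [smoothInnerA]
  | cons j rest ih =>
      simp only [smoothInnerA, List.any_cons, ih]
      by_cases h : PySem.List.pyGetD data j 0 > 0 <;> simp [h]

-- the count difference is positive iff the window contains a positive entry
theorem pv_cond_iff (data : List Int) (lo hi : Int)
    (hlo : 0 ≤ lo) (hhi : hi ≤ (data.length : Int)) :
    ((PySem.List.pyRange lo hi 1).any (fun j => decide (0 < PySem.List.pyGetD data j 0)) = true)
      ↔ (lo < hi ∧ pvCt data hi.toNat - pvCt data lo.toNat > 0) := by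
  by_cases hord : hi ≤ lo
  · rw [PySem.List.pyRange_one_eq_nil hord]
    simp
    omega
  · rw [not_le] at hord
    have ha : lo.toNat ≤ hi.toNat := by omega
    have hb : hi.toNat ≤ data.length := by omega
    have hsplit : data.take hi.toNat
        = data.take lo.toNat ++ (data.drop lo.toNat).take (hi.toNat - lo.toNat) := by
      rw [← List.take_add]
      congr 1
      omega
    have hdiff : pvCt data hi.toNat - pvCt data lo.toNat
        = (((data.drop lo.toNat).take (hi.toNat - lo.toNat)).countP (fun x => decide (0 < x)) : Int) := by
      simp [pvCt, hsplit, List.countP_append]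
    rw [hdiff]
    have hseglen : ((data.drop lo.toNat).take (hi.toNat - lo.toNat)).length = hi.toNat - lo.toNat := by
      simp
      omega
    constructor
    · intro h
      refine ⟨hord, ?_⟩
      obtain ⟨j, hjmem, hjp⟩ := List.any_eq_true.mp h
      obtain ⟨hjlo, hjhi⟩ := PySem.List.mem_pyRange_one.mp hjmem
      have hjc : 0 < ((data.drop lo.toNat).take (hi.toNat - lo.toNat)).countP (fun x => decide (0 < x)) := by
        apply List.countP_pos_iff.mpr
        refine ⟨data[j.toNat]'(by omega), ?_, ?_⟩
        · have hk : j.toNat - lo.toNat < ((data.drop lo.toNat).take (hi.toNat - lo.toNat)).length := by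
            omega
          have : ((data.drop lo.toNat).take (hi.toNat - lo.toNat))[j.toNat - lo.toNat]'hk = data[j.toNat]'(by omega) := by
            rw [List.getElem_take, List.getElem_drop]
            congr 1
            omega
          rw [← this]
          exact List.getElem_mem hk
        · rw [PySem.List.pyGetD_eq_getElem _ _ (by omega) (by omega)] at hjp
          exact hjp
      exact_mod_cast hjc
    · rintro ⟨-, hpos⟩
      have hc : 0 < ((data.drop lo.toNat).take (hi.toNat - lo.toNat)).countP (fun x => decide (0 < x)) := by
        exact_mod_cast hpos
      obtain ⟨x, hxmem, hxp⟩ := List.countP_pos_iff.mp hc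
      obtain ⟨k, hk, hkx⟩ := List.getElem_of_mem hxmem
      apply List.any_eq_true.mpr
      refine ⟨lo + k, PySem.List.mem_pyRange_one.mpr ⟨by omega, by omega⟩, ?_⟩
      rw [PySem.List.pyGetD_eq_getElem _ _ (by omega) (by omega)]
      have hgk : data[((lo + (k : Int)).toNat)]'(by omega)
          = ((data.drop lo.toNat).take (hi.toNat - lo.toNat))[k]'hk := by
        rw [List.getElem_take, List.getElem_drop]
        congr 1
        omega
      rw [hgk, hkx]
      exact hxp

-- ===== VERDICT (by name: the statement is the Claim_ definition above) =====
theorem smooth_kernel_spec : Claim_equal_smooth_kernel := by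
  intro data offset _
  unfold Spec_smooth_kernel smooth_kernel smooth_kernel_alt
  rw [pv_foldl_push, pv_foldl_push]
  simp only [List.nil_append]
  apply List.map_congr_left
  intro i hi
  obtain ⟨hi0, hin⟩ := PySem.List.mem_pyRange_one.mp hi
  rw [pv_inner_eq]
  by_cases hord : max 0 (i - offset) < min (data.length : Int) (i + offset + 1)
  · rw [pv_prefix_get data (min (data.length : Int) (i + offset + 1)) (by omega) (by omega),
        pv_prefix_get data (max 0 (i - offset)) (by omega) (by omega)]
    apply if_congr _ rfl rfl
    exact pv_cond_iff data _ _ (by omega) (by omega)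
  · rw [PySem.List.pyRange_one_eq_nil (by omega)]
    simp [hord]
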